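-- pv_equiv track=rewrite | github.com/Trummler12/Schoolsystem2 | backend/src/main/resources/scripts/embedding/testing/tag_update.py | split_cli_groups
-- ===== SOURCE A (Python) =====
-- from typing import Iterable, List, Sequence, Tuple
--
-- def split_cli_groups(values: Sequence[Sequence[str]]) -> List[str]:
--     tokens: List[str] = []
--     for group in values:
--         for value in group:
--             for part in value.split(","):
--                 part = part.strip()
--                 if part:
--                     tokens.append(part)
--     return tokens
-- ===== SOURCE B (Python) =====
-- from typing import Iterable, List, Sequence, Tuple
--
-- def split_cli_groups(values: Sequence[Sequence[str]]) -> List[str]: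
--     # Single-pass character scanner: walk each value's characters, buffering
--     # until a comma, flushing the stripped buffer; no call to str.split.
--     tokens: List[str] = []
--     for value in (v for g in values for v in g):
--         buf: List[str] = []
--         for ch in value:
--             if ch == ",":
--                 t = "".join(buf).strip()
--                 if t:
--                     tokens.append(t)
--                 buf = []
--             else:
--                 buf.append(ch)
--         t = "".join(buf).strip()
--         if t:
--             tokens.append(t)
--     return tokens
-- ===== Notes on version B (the rewrite author's own statement) =====
-- stated objective: alternative
-- what changed: B replaces A's nested per-value str.split/strip loops with a single-pass character-level scanner that buffers characters, flushing the stripped buffer at each comma and at end of value.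
import Mathlib
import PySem

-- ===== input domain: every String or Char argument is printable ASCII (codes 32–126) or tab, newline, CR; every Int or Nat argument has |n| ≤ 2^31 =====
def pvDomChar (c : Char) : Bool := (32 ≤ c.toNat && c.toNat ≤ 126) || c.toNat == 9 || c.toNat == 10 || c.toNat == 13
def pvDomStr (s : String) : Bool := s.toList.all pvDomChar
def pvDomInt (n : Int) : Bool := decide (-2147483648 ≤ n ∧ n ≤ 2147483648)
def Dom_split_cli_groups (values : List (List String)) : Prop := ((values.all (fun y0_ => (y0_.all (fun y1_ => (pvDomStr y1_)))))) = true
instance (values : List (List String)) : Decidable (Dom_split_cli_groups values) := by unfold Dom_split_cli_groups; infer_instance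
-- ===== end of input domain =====

-- B replaces A's nested str.split/strip loops with a single-pass character scanner
-- (buffer until a comma, flush the stripped buffer); objective: alternative, same cost.

-- ===== PORT A =====
def split_cli_groups (values : List (List String)) : List String :=
  values.foldl (fun tokens group =>
    group.foldl (fun tokens value =>
      ((PySem.Str.split? value ",").getD []).foldl (fun tokens part =>
        let part := PySem.Str.strip part
        if part ≠ "" then tokens ++ [part] else tokens) tokens) tokens) []

-- ===== PORT B =====
def split_cli_groups_alt (values : List (List String)) : List String :=
  (values.flatMap id).foldl (fun tokens value =>
    let st := value.toList.foldl (fun (st : List String × List Char) ch =>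
      if ch = ',' then
        let t := PySem.Str.strip (String.ofList st.2)
        (if t ≠ "" then st.1 ++ [t] else st.1, ([] : List Char))
      else (st.1, st.2 ++ [ch])) (tokens, [])
    let t := PySem.Str.strip (String.ofList st.2)
    if t ≠ "" then st.1 ++ [t] else st.1) []

-- ===== PRECONDITION & SPEC =====
def Spec_split_cli_groups (values : List (List String)) (out : List String) : Prop := out = split_cli_groups_alt values
instance (values : List (List String)) (out : List String) : Decidable (Spec_split_cli_groups values out) := by unfold Spec_split_cli_groups; infer_instance

-- ===== CLAIM =====
def Claim_equal_split_cli_groups : Prop := ∀ (values : List (List String)), Dom_split_cli_groups values → Spec_split_cli_groups values (split_cli_groups values)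

-- ===== LEMMAS AND PROOFS =====

/-- simple recursive characterisation of splitting on a single comma -/
def mySplit : List Char → List (List Char)
  | [] => [[]]
  | a :: t => if a = ',' then [] :: mySplit t else (mySplit t).modifyHead (a :: ·)

theorem mySplit_ne_nil (l : List Char) : mySplit l ≠ [] := by
  induction l with
  | nil => simp [mySplit]
  | cons a t ih =>
    simp only [mySplit]
    split_ifs
    · simp
    · cases hmt : mySplit t with
      | nil => exact absurd hmt ih
      | cons x xs => simp

theorem mySplit_headI_tail (l : List Char) :
    (mySplit l).headI :: (mySplit l).tail = mySplit l := by
  cases hm : mySplit l with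
  | nil => exact absurd hm (mySplit_ne_nil l)
  | cons x xs => rfl

theorem go_spec (l : List Char) (fuel : Nat) (cur : List Char) (acc : List (List Char))
    (h : l.length < fuel) :
    PySem.Chars.splitOn.go [','] fuel l cur acc =
      acc.reverse ++ (cur.reverse ++ (mySplit l).headI) :: (mySplit l).tail := by
  induction l generalizing fuel cur acc with
  | nil =>
    cases fuel with
    | zero => omega
    | succ k => simp [PySem.Chars.splitOn.go, mySplit]
  | cons a t ih =>
    cases fuel with
    | zero => omega
    | succ k =>
      simp only [List.length_cons, Nat.succ_lt_succ_iff] at h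
      rw [PySem.Chars.splitOn.go]
      by_cases ha : a = ','
      · subst ha
        simp only [List.isPrefixOf, beq_self_eq_true, Bool.true_and,
          if_true, List.length_singleton, List.drop_succ_cons, List.drop_zero]
        rw [ih k [] (cur.reverse :: acc) h]
        simp [mySplit, mySplit_headI_tail t]
      · have hpre : [','].isPrefixOf (a :: t) = false := by
          simp [List.isPrefixOf]
          intro hc; exact absurd hc.symm ha
        rw [hpre]
        simp only [Bool.false_eq_true, if_false]
        rw [ih k (a :: cur) acc h]
        have hne := mySplit_ne_nil t
        cases hm : mySplit t with
        | nil => exact absurd hm hne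
        | cons x xs => simp [mySplit, ha, hm]

theorem splitOn_comma (l : List Char) : PySem.Chars.splitOn l [','] = mySplit l := by
  unfold PySem.Chars.splitOn
  rw [go_spec l (l.length + 1) [] [] (by omega)]
  have hne := mySplit_ne_nil l
  cases hm : mySplit l with
  | nil => exact absurd hm hne
  | cons x xs => simp

/-- one token-or-nothing per comma-part (char-buffer form) -/
def pvEmit (cs : List Char) : List String :=
  let t := PySem.Str.strip (String.ofList cs)
  if t ≠ "" then [t] else []

theorem foldl_tok (parts : List String) (acc : List String) :
    parts.foldl (fun tokens part =>
        let part := PySem.Str.strip part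
        if part ≠ "" then tokens ++ [part] else tokens) acc
      = acc ++ (parts.map String.toList).flatMap pvEmit := by
  induction parts generalizing acc with
  | nil => simp
  | cons p ps ih =>
    simp only [List.map_cons, List.foldl_cons, List.flatMap_cons, ih, pvEmit]
    have hp : String.ofList p.toList = p := by simp
    rw [hp]
    by_cases hq : PySem.Str.strip p ≠ "" <;> simp [hq]

theorem split?_getD (v : String) :
    ((PySem.Str.split? v ",").getD []).map String.toList = mySplit v.toList := by
  unfold PySem.Str.split?
  simp [PySem.Chars.split?, splitOn_comma, List.map_map, Function.comp_def]

theorem A_eq (values : List (List String)) :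
    split_cli_groups values
      = (values.flatMap id).flatMap (fun v => (mySplit v.toList).flatMap pvEmit) := by
  unfold split_cli_groups
  have hG : ∀ (group : List String) (acc : List String),
      group.foldl (fun tokens value =>
        ((PySem.Str.split? value ",").getD []).foldl (fun tokens part =>
          let part := PySem.Str.strip part
          if part ≠ "" then tokens ++ [part] else tokens) tokens) acc
      = acc ++ group.flatMap (fun v => (mySplit v.toList).flatMap pvEmit) := by
    intro group
    induction group with
    | nil => simp
    | cons v vs ih =>
      intro acc
      rw [List.foldl_cons, foldl_tok, split?_getD, ih]
      simp [List.flatMap_cons]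
  have hF : ∀ (vss : List (List String)) (acc : List String),
      vss.foldl (fun tokens group =>
        group.foldl (fun tokens value =>
          ((PySem.Str.split? value ",").getD []).foldl (fun tokens part =>
            let part := PySem.Str.strip part
            if part ≠ "" then tokens ++ [part] else tokens) tokens) tokens) acc
      = acc ++ (vss.flatMap id).flatMap (fun v => (mySplit v.toList).flatMap pvEmit) := by
    intro vss
    induction vss with
    | nil => simp
    | cons g gs ih =>
      intro acc
      rw [List.foldl_cons, hG, ih]
      simp [List.flatMap_cons]
  simpa using hF values []

-- helper append lemma for mySplit
theorem mySplit_append (a b : List Char) :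
    mySplit (a ++ ',' :: b) = mySplit a ++ mySplit b := by
  induction a with
  | nil => simp [mySplit]
  | cons x t ih =>
    by_cases hx : x = ','
    · simp [mySplit, hx, ih]
    · have hne := mySplit_ne_nil t
      cases hm : mySplit t with
      | nil => exact absurd hm hne
      | cons y ys => simp [mySplit, hx, ih, hm]

theorem mySplit_no_comma (cs : List Char) (h : ',' ∉ cs) : mySplit cs = [cs] := by
  induction cs with
  | nil => rfl
  | cons a t ih =>
    simp only [List.mem_cons, not_or] at h
    have ha : ¬ a = ',' := fun hc => h.1 hc.symm
    simp [mySplit, ha, ih h.2]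

/-- B's per-value scan (fold plus final flush) emits the comma-parts of cur ++ l. -/
theorem scan_spec (l cur : List Char) (tokens : List String) (hcur : ',' ∉ cur) :
    (let st := l.foldl (fun (st : List String × List Char) ch =>
        if ch = ',' then
          let t := PySem.Str.strip (String.ofList st.2)
          (if t ≠ "" then st.1 ++ [t] else st.1, ([] : List Char))
        else (st.1, st.2 ++ [ch])) (tokens, cur)
     let t := PySem.Str.strip (String.ofList st.2)
     if t ≠ "" then st.1 ++ [t] else st.1)
    = tokens ++ (mySplit (cur ++ l)).flatMap pvEmit := by
  induction l generalizing cur tokens with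
  | nil =>
    simp only [List.foldl_nil, List.append_nil, mySplit_no_comma cur hcur,
      List.flatMap_cons, List.flatMap_nil, List.append_nil, pvEmit]
    split_ifs <;> simp
  | cons ch t ih =>
    by_cases hc : ch = ','
    · subst hc
      have hstep : (if (',' : Char) = ',' then
            let t := PySem.Str.strip (String.ofList (tokens, cur).2)
            (if t ≠ "" then (tokens, cur).1 ++ [t] else (tokens, cur).1, ([] : List Char))
          else ((tokens, cur).1, (tokens, cur).2 ++ [','])) = (tokens ++ pvEmit cur, ([] : List Char)) := by
        simp only [pvEmit]
        split_ifs <;> simp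
      rw [List.foldl_cons, hstep]
      have h2 := ih [] (tokens ++ pvEmit cur) (by simp)
      simp only [List.nil_append] at h2
      dsimp only at h2 ⊢
      rw [h2]
      have hsplit : mySplit (cur ++ ',' :: t) = cur :: mySplit t := by
        rw [mySplit_append cur t, mySplit_no_comma cur hcur]; rfl
      rw [hsplit]
      simp [List.flatMap_cons, List.append_assoc]
    · rw [List.foldl_cons]
      simp only [if_neg hc]
      have hcur' : ',' ∉ cur ++ [ch] := by
        intro hm
        rcases List.mem_append.1 hm with h | h
        · exact hcur h
        · simp only [List.mem_singleton] at h
          exact hc h.symm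
      have := ih (cur ++ [ch]) tokens hcur'
      simpa [List.append_assoc] using this

theorem B_eq (values : List (List String)) :
    split_cli_groups_alt values
      = (values.flatMap id).flatMap (fun v => (mySplit v.toList).flatMap pvEmit) := by
  unfold split_cli_groups_alt
  have hF : ∀ (vs : List String) (acc : List String),
      vs.foldl (fun tokens value =>
        let st := value.toList.foldl (fun (st : List String × List Char) ch =>
          if ch = ',' then
            let t := PySem.Str.strip (String.ofList st.2)
            (if t ≠ "" then st.1 ++ [t] else st.1, ([] : List Char))
          else (st.1, st.2 ++ [ch])) (tokens, [])
        let t := PySem.Str.strip (String.ofList st.2)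
        if t ≠ "" then st.1 ++ [t] else st.1) acc
      = acc ++ vs.flatMap (fun v => (mySplit v.toList).flatMap pvEmit) := by
    intro vs
    induction vs with
    | nil => simp
    | cons v rest ih =>
      intro acc
      rw [List.foldl_cons]
      have hv := scan_spec v.toList [] acc (by simp)
      simp only [List.nil_append] at hv
      dsimp only at hv ⊢
      rw [hv, ih]
      simp [List.flatMap_cons, List.append_assoc]
  simpa using hF (values.flatMap id) []

-- ===== VERDICT =====
theorem split_cli_groups_spec : Claim_equal_split_cli_groups := by
  intro values _
  unfold Spec_split_cli_groups
  rw [A_eq, B_eq]
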